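-- pv_equiv track=rewrite | github.com/adap/flower | baselines/fedstar/fedstar/utils.py | split_class_samples
-- ===== SOURCE A (Python) =====
-- def split_class_samples(dataset, partitions=1):
--     """Split class samples in a dataset into specified number of partitions.
--
--     Parameters
--     ----------
--     - dataset: The dataset to be split.
--     - partitions: The number of partitions.
--
--     Returns
--     -------
--     - A list of dataset partitions.
--     """
--     total = len(dataset[0])
--     size = total // partitions
--     rest = total % partitions
--     ranges = []
--     assert size != 0 and partitions > 0
--     if rest:
--         index = list(range(0, total, size))
--         extra = [index[i] + i for i in range(rest + 1)] + [
--             x + rest for x in index[rest + 1 :][: partitions - rest]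
--         ]
--         ranges = [(extra[i], extra[i + 1]) for i in range(len(extra) - 1)]
--     else:
--         index = list(range(0, total + 1, size))
--         ranges = [(index[i], index[i + 1]) for i in range(len(index) - 1)]
--     return [(dataset[0][i:j], dataset[1][i:j]) for i, j in ranges]
-- ===== SOURCE B (Python) =====
-- def split_class_samples(dataset, partitions=1):
--     """Split class samples in a dataset into specified number of partitions."""
--     total = len(dataset[0])
--     size, rest = divmod(total, partitions)
--     assert size != 0 and partitions > 0
--     out = []
--     start = 0
--     for i in range(partitions):
--         length = size + (1 if i < rest else 0)
--         out.append((dataset[0][start:start + length], dataset[1][start:start + length]))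
--         start += length
--     return out
-- ===== Notes on version B (the rewrite author's own statement) =====
-- stated objective: simpler
-- what changed: Replaces A's two-branch boundary-list construction (range/step index list, an 'extra' list patched with offsets, then consecutive pairs) by a single running-offset loop: partition i has length size + (1 if i < rest else 0) and is sliced at the accumulated start.
import Mathlib
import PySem

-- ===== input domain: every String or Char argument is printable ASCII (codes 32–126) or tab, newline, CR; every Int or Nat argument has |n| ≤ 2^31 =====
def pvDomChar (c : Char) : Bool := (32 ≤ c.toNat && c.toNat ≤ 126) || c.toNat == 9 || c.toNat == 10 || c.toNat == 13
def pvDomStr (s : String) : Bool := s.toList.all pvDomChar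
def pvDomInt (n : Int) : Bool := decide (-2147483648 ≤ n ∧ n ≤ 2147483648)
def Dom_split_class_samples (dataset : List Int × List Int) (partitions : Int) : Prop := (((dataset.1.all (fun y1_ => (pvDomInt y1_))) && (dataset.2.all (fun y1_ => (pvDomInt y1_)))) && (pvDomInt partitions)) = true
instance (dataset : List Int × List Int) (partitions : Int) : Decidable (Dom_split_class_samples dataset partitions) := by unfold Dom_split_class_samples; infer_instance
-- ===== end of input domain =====

-- B replaces A's two-branch boundary-list construction by a single running-offset loop
-- (partition i gets size + (1 if i < rest else 0) elements); same values, simpler decomposition.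


-- ===== PORT A =====
-- literal transliteration of Source A; list indexing extra[i]/index[i] is rendered with
-- pyGetD _ _ 0, exact wherever Python does not raise (Pre_ guarantees in-range).
def split_class_samples (dataset : List Int × List Int) (partitions : Int) : List (List Int × List Int) :=
  let total : Int := dataset.1.length
  let size : Int := PySem.Int.floordiv total partitions
  let rest : Int := PySem.Int.mod total partitions
  let ranges : List (Int × Int) :=
    if rest ≠ 0 then
      let index : List Int := PySem.List.pyRange 0 total size
      let extra : List Int :=
        (PySem.List.pyRange 0 (rest + 1) 1).map (fun i => PySem.List.pyGetD index i 0 + i) ++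
        (PySem.List.slice (PySem.List.slice index (some (rest + 1)) none) none
          (some (partitions - rest))).map (fun x => x + rest)
      (List.range (extra.length - 1)).map
        (fun (i : Nat) => (PySem.List.pyGetD extra (i : Int) 0, PySem.List.pyGetD extra ((i : Int) + 1) 0))
    else
      let index : List Int := PySem.List.pyRange 0 (total + 1) size
      (List.range (index.length - 1)).map
        (fun (i : Nat) => (PySem.List.pyGetD index (i : Int) 0, PySem.List.pyGetD index ((i : Int) + 1) 0))
  ranges.map (fun ij =>
    (PySem.List.slice dataset.1 (some ij.1) (some ij.2),
     PySem.List.slice dataset.2 (some ij.1) (some ij.2)))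

-- ===== PORT B =====
-- literal transliteration of Source B; divmod(total, partitions) is divmod?, whose junk value
-- at partitions = 0 is outside Pre_ (Python raises ZeroDivisionError there).
def split_class_samples_alt (dataset : List Int × List Int) (partitions : Int) : List (List Int × List Int) :=
  let total : Int := dataset.1.length
  let sr : Int × Int := (PySem.Int.divmod? total partitions).getD (0, 0)
  let size : Int := sr.1
  let rest : Int := sr.2
  ((PySem.List.pyRange 0 partitions 1).foldl
    (fun (st : List (List Int × List Int) × Int) (i : Int) =>
      let length : Int := size + (if i < rest then 1 else 0)
      let start : Int := st.2
      (st.1 ++ [(PySem.List.slice dataset.1 (some start) (some (start + length)),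
                 PySem.List.slice dataset.2 (some start) (some (start + length)))],
       start + length))
    ([], 0)).1

-- ===== PRECONDITION & SPEC =====
-- A raises ZeroDivisionError when partitions = 0 and AssertionError when partitions < 0
-- or size = total // partitions = 0 (i.e. total < partitions); Pre_ excludes exactly those.
def Pre_split_class_samples (dataset : List Int × List Int) (partitions : Int) : Prop :=
  0 < partitions ∧ partitions ≤ (dataset.1.length : Int)
instance (dataset : List Int × List Int) (partitions : Int) : Decidable (Pre_split_class_samples dataset partitions) := by unfold Pre_split_class_samples; infer_instance
def pvWitness_split_class_samples : (List Int × List Int) × Int := (([1, 2, 3, 4, 5], [7, 8, 9, 10, 11]), 2)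

def Spec_split_class_samples (dataset : List Int × List Int) (partitions : Int) (out : List (List Int × List Int)) : Prop := out = split_class_samples_alt dataset partitions
instance (dataset : List Int × List Int) (partitions : Int) (out : List (List Int × List Int)) : Decidable (Spec_split_class_samples dataset partitions out) := by unfold Spec_split_class_samples; infer_instance

-- ===== CLAIM (what is proved, stated in full; the proofs are below) =====
def Claim_equal_split_class_samples : Prop := ∀ (dataset : List Int × List Int) (partitions : Int), Dom_split_class_samples dataset partitions → Pre_split_class_samples dataset partitions → Spec_split_class_samples dataset partitions (split_class_samples dataset partitions)

-- ===== LEMMAS AND PROOFS =====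

-- boundary of partition k: the first (min k rest) earlier partitions contribute size+1, the rest size
def pvBnd (s r : Int) (k : Nat) : Int := k * s + min (k : Int) r

-- the pair of slices between two boundaries
def pvPair (ds : List Int × List Int) (a b : Int) : List Int × List Int :=
  (PySem.List.slice ds.1 (some a) (some b), PySem.List.slice ds.2 (some a) (some b))

-- the common normal form both ports are reduced to
def pvCanon (ds : List Int × List Int) (s r : Int) (p : Nat) : List (List Int × List Int) :=
  (List.range p).map (fun k => pvPair ds (pvBnd s r k) (pvBnd s r (k + 1)))

lemma pvBnd_step (s r : Int) (m : Nat) (hr : 0 ≤ r) :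
    pvBnd s r m + (s + (if (m : Int) < r then 1 else 0)) = pvBnd s r (m + 1) := by
  unfold pvBnd
  push_cast
  rw [add_one_mul]
  split_ifs with h <;> omega

lemma alt_loop (ds : List Int × List Int) (s r : Int) (hr : 0 ≤ r) (p : Nat) :
    ((List.range p).foldl
      (fun (st : List (List Int × List Int) × Int) (k : Nat) =>
        (st.1 ++ [pvPair ds st.2 (st.2 + (s + (if (k : Int) < r then 1 else 0)))],
         st.2 + (s + (if (k : Int) < r then 1 else 0))))
      ([], 0))
    = (pvCanon ds s r p, pvBnd s r p) := by
  induction p with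
  | zero => simp [pvCanon, pvBnd, min_eq_left hr]
  | succ m ih =>
    rw [List.range_succ, List.foldl_append, ih]
    simp only [List.foldl_cons, List.foldl_nil, pvCanon, List.range_succ, List.map_append,
      List.map_cons, List.map_nil]
    rw [pvBnd_step s r m hr]

lemma alt_eq_canon (ds : List Int × List Int) (P : Int) (hP : 0 < P) :
    split_class_samples_alt ds P
      = pvCanon ds (PySem.Int.floordiv (ds.1.length : Int) P) (PySem.Int.mod (ds.1.length : Int) P) P.toNat := by
  unfold split_class_samples_alt
  simp only [PySem.Int.divmod?, PySem.Int.floordiv, PySem.Int.mod, hP.ne', ite_false,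
    Option.getD_some, PySem.List.pyRange_one, List.foldl_map]
  rw [show (P - 0).toNat = P.toNat by omega]
  have := alt_loop ds ((ds.1.length : Int).fdiv P) ((ds.1.length : Int).fmod P)
    (by simpa [PySem.Int.mod] using PySem.Int.mod_nonneg (ds.1.length : Int) hP) P.toNat
  simp only [zero_add, pvPair] at this ⊢
  rw [this]

-- the extra list of the rest≠0 branch equals the boundary list
lemma extra_eq (T S R P : Int) (hS : 1 ≤ S) (hP : 0 < P) (hR : 1 ≤ R) (hRP : R < P)
    (hT : S * P + R = T) :
    (PySem.List.pyRange 0 (R + 1) 1).map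
        (fun i => PySem.List.pyGetD (PySem.List.pyRange 0 T S) i 0 + i) ++
      (PySem.List.slice (PySem.List.slice (PySem.List.pyRange 0 T S) (some (R + 1)) none) none
          (some (P - R))).map (fun x => x + R)
      = (List.range (P.toNat + 1)).map (fun k => pvBnd S R k) := by
  set cnt : Nat := ((T + S - 1) / S).toNat with hcnt
  have hcntge : P.toNat + 1 ≤ cnt := by
    have h : P + 1 ≤ (T + S - 1) / S := by
      rw [Int.le_ediv_iff_mul_le (by omega)]; nlinarith
    omega
  have hidx : PySem.List.pyRange 0 T S = (List.range cnt).map (fun (k : Nat) => S * (k : Int)) := by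
    rw [PySem.List.pyRange_of_pos 0 T (by omega), if_pos (by nlinarith)]
    simp only [zero_add, sub_zero, hcnt]
  have hpart1 : (PySem.List.pyRange 0 (R + 1) 1).map
      (fun i => PySem.List.pyGetD (PySem.List.pyRange 0 T S) i 0 + i)
      = (List.range (R + 1).toNat).map (fun k => pvBnd S R k) := by
    rw [PySem.List.pyRange_one, List.map_map,
      show ((R : Int) + 1 - 0).toNat = (R + 1).toNat by omega]
    apply List.map_congr_left
    intro k hk
    simp only [List.mem_range] at hk
    simp only [Function.comp, zero_add, hidx, PySem.List.pyGetD_natCast]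
    rw [PySem.List.getD_map_range _ _ _ _ (by omega : k < cnt)]
    simp only [pvBnd]
    rw [show min ((k : Nat) : Int) R = (k : Int) by omega]
    ring
  have hpart2 : (PySem.List.slice (PySem.List.slice (PySem.List.pyRange 0 T S) (some (R + 1)) none)
        none (some (P - R))).map (fun x => x + R)
      = (List.range (P - R).toNat).map (fun k => pvBnd S R ((R + 1).toNat + k)) := by
    rw [hidx, PySem.List.slice_from _ (by omega : (0:Int) ≤ R + 1),
      PySem.List.slice_to _ (by omega : (0:Int) ≤ P - R),
      ← List.map_drop, ← List.map_take,
      show cnt = (R + 1).toNat + (cnt - (R + 1).toNat) by omega, List.range_add,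
      List.drop_append_of_le_length (by simp),
      show List.drop (R + 1).toNat (List.range (R + 1).toNat) = [] by simp,
      List.nil_append, ← List.map_take, List.take_range,
      show min (P - R).toNat (cnt - (R + 1).toNat) = (P - R).toNat by omega,
      List.map_map, List.map_map]
    apply List.map_congr_left
    intro k hk
    simp only [List.mem_range] at hk
    simp only [Function.comp, pvBnd]
    rw [show min ((((R + 1).toNat + k : Nat)) : Int) R = R by omega]
    push_cast
    rw [show ((R + 1).toNat : Int) = R + 1 by omega]
    ring
  rw [hpart1, hpart2,
    show P.toNat + 1 = (R + 1).toNat + (P - R).toNat by omega, List.range_add,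
    List.map_append, List.map_map]
  congr 1

-- consecutive-pairs comprehension over a boundary list given as map over a range
lemma ranges_of_map (B : Nat → Int) (p : Nat) :
    (List.range (((List.range (p + 1)).map B).length - 1)).map
        (fun (i : Nat) => (PySem.List.pyGetD ((List.range (p + 1)).map B) (i : Int) 0,
                   PySem.List.pyGetD ((List.range (p + 1)).map B) ((i : Int) + 1) 0))
      = (List.range p).map (fun i => (B i, B (i + 1))) := by
  simp only [List.length_map, List.length_range, Nat.add_sub_cancel]
  apply List.map_congr_left
  intro i hi
  simp only [List.mem_range] at hi
  rw [show ((i : Int) + 1) = (((i + 1 : Nat)) : Int) by push_cast; ring,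
    PySem.List.pyGetD_natCast, PySem.List.pyGetD_natCast,
    PySem.List.getD_map_range _ _ _ _ (by omega : i < p + 1),
    PySem.List.getD_map_range _ _ _ _ (by omega : i + 1 < p + 1)]

lemma a_eq_canon (ds : List Int × List Int) (P : Int) (hP : 0 < P)
    (hPn : P ≤ (ds.1.length : Int)) :
    split_class_samples ds P
      = pvCanon ds (PySem.Int.floordiv (ds.1.length : Int) P)
          (PySem.Int.mod (ds.1.length : Int) P) P.toNat := by
  set T : Int := (ds.1.length : Int) with hTdef
  set S : Int := PySem.Int.floordiv T P with hSdef
  set R : Int := PySem.Int.mod T P with hRdef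
  have hS : 1 ≤ S := by
    rw [hSdef]; rw [PySem.Int.le_floordiv_iff_mul_le hP]; omega
  have hR0 : 0 ≤ R := PySem.Int.mod_nonneg T hP
  have hRP : R < P := PySem.Int.mod_lt T hP
  have hT : S * P + R = T := PySem.Int.floordiv_mul_add_mod T P
  unfold split_class_samples
  simp only [← hTdef, ← hSdef, ← hRdef]
  by_cases hR : R ≠ 0
  · rw [if_pos hR, extra_eq T S R P hS hP (by omega) hRP hT]
    rw [ranges_of_map (fun k => pvBnd S R k) P.toNat, List.map_map]
    simp only [pvCanon, Function.comp_def, pvPair]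
  · rw [if_neg hR]
    rw [not_not] at hR
    have hidx0 : PySem.List.pyRange 0 (T + 1) S
        = (List.range (P.toNat + 1)).map (fun (k : Nat) => S * (k : Int)) := by
      rw [PySem.List.pyRange_of_pos 0 (T + 1) (by omega), if_pos (by nlinarith)]
      simp only [zero_add, sub_zero]
      rw [show T + 1 + S - 1 = S * (P + 1) by rw [← hT, hR]; ring,
        Int.mul_ediv_cancel_left _ (by omega)]
      rw [show (P + 1).toNat = P.toNat + 1 by omega]
    rw [hidx0, ranges_of_map (fun (k : Nat) => S * (k : Int)) P.toNat, List.map_map]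
    simp only [pvCanon, pvPair, hR]
    apply List.map_congr_left
    intro i hi
    simp only [List.mem_range] at hi
    have e1 : S * ((i : Nat) : Int) = pvBnd S 0 i := by
      unfold pvBnd; rw [show min ((i : Nat) : Int) 0 = 0 by omega]; ring
    have e2 : S * (((i + 1 : Nat)) : Int) = pvBnd S 0 (i + 1) := by
      unfold pvBnd; rw [show min (((i + 1 : Nat)) : Int) 0 = 0 by omega]; ring
    rw [← e1, ← e2]
    simp

-- ===== VERDICT (by name: the statement is the Claim_ definition above) =====
theorem split_class_samples_spec : Claim_equal_split_class_samples := by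
  intro ds P _hDom hPre
  obtain ⟨hP, hPn⟩ := hPre
  unfold Spec_split_class_samples
  rw [a_eq_canon ds P hP hPn, alt_eq_canon ds P hP]
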